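-- pv_equiv track=rewrite | github.com/nathanaeljyhlee/career-alignment | analysis/cross_role.py | _fuzzy_group_gaps
-- ===== SOURCE A (Python) =====
-- def _normalize_gap_description(description: str) -> str:
--     """Strip common prefixes and normalize gap description to a skill-like key."""
--     description = description.lower().strip()
--     # Remove common prefixes
--     prefixes = [
--         "lacks ", "missing ", "no ", "limited ", "weak ", "insufficient ",
--         "need ", "needs ", "requires ", "require ",
--     ]
--     for prefix in prefixes:
--         if description.startswith(prefix):
--             description = description[len(prefix):]
--     # Take only the first 5 words as the key (avoids over-splitting)
--     words = description.split()[:5]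
--     return " ".join(words)
--
-- def _fuzzy_group_gaps(
--     all_gaps: list[dict],
-- ) -> dict[str, list[dict]]:
--     """
--     Group gap items by normalized description key.
--     Returns {normalized_key: [gap_item_dict, ...]} sorted by occurrence count desc.
--     """
--     groups: dict[str, list[dict]] = {}
--     for gap in all_gaps:
--         key = _normalize_gap_description(gap.get("description", ""))
--         if not key:
--             continue
--         if key not in groups:
--             groups[key] = []
--         groups[key].append(gap)
--     return groups
-- ===== SOURCE B (Python) =====
-- def _normalize_gap_description(description: str) -> str:
--     """Strip common prefixes and normalize gap description to a skill-like key."""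
--     description = description.lower().strip()
--     prefixes = [
--         "lacks ", "missing ", "no ", "limited ", "weak ", "insufficient ",
--         "need ", "needs ", "requires ", "require ",
--     ]
--     for prefix in prefixes:
--         if description.startswith(prefix):
--             description = description[len(prefix):]
--     words = description.split()[:5]
--     return " ".join(words)
--
--
-- def _fuzzy_group_gaps(all_gaps):
--     # Two-phase grouping: compute all keys up front, collect first-seen distinct
--     # nonempty keys, then build each group by one filter pass per distinct key.
--     pairs = [(_normalize_gap_description(gap.get("description", "")), gap) for gap in all_gaps]
--     seen = []
--     for key, _ in pairs:
--         if key and key not in seen: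
--             seen.append(key)
--     return {key: [gap for k, gap in pairs if k == key] for key in seen}
-- ===== Notes on version B (the rewrite author's own statement) =====
-- stated objective: alternative
-- what changed: A scatters gaps into a dict in one pass (insert-if-absent then append); B first maps every gap to its normalized key, collects the distinct nonempty keys in first-seen order, and then builds each group by a separate filter pass over the key/gap pairs.
import Mathlib
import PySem

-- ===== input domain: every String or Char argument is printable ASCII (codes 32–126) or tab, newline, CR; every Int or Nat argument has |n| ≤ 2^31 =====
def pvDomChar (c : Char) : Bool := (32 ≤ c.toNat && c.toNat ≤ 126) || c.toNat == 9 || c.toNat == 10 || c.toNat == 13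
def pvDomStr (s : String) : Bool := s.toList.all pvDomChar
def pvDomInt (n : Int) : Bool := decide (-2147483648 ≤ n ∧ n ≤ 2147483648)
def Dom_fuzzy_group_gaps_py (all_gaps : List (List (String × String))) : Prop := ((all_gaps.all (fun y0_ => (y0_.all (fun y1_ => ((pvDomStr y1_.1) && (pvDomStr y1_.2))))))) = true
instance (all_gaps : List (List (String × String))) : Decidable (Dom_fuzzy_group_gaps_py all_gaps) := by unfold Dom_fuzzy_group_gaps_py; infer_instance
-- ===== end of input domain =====

-- B replaces A's scatter-into-dict loop by a two-phase pass (collect distinct keys, then one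
-- filter per key); objective: alternative decomposition, same results, not claimed faster.

-- ===== PORT A =====
-- shared helper: _normalize_gap_description (B's Python keeps it unchanged)
def normalize_gap_description (description : String) : String :=
  let description := PySem.Str.strip (PySem.Str.lower description)
  let prefixes : List String :=
    ["lacks ", "missing ", "no ", "limited ", "weak ", "insufficient ",
     "need ", "needs ", "requires ", "require "]
  let description := prefixes.foldl
    (fun d pre => if PySem.Str.startswith d pre then PySem.Str.slice d (some (PySem.Str.len pre : Int)) none else d)
    description
  let words := PySem.List.slice (PySem.Str.split₀ description) none (some 5)
  PySem.Str.join " " words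

def fuzzy_group_gaps_py (all_gaps : List (List (String × String))) : List (String × List (List (String × String))) :=
  (all_gaps.foldl
    (fun groups gap =>
      let key := normalize_gap_description ((PySem.Dict.mk gap).getD "description" "")
      if key = "" then groups
      else
        let groups := if groups.contains key then groups else groups.insert key []
        groups.modify key [] (fun l => l ++ [gap]))
    PySem.Dict.empty).items

-- ===== PORT B =====
def fuzzy_group_gaps_py_alt (all_gaps : List (List (String × String))) : List (String × List (List (String × String))) :=
  let pairs := all_gaps.map (fun gap => (normalize_gap_description ((PySem.Dict.mk gap).getD "description" ""), gap))
  let seen := pairs.foldl (fun seen p => if p.1 ≠ "" ∧ p.1 ∉ seen then seen ++ [p.1] else seen) []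
  seen.map (fun key => (key, (pairs.filter (fun p => p.1 == key)).map (fun p => p.2)))

-- ===== PRECONDITION & SPEC =====
def Spec_fuzzy_group_gaps_py (all_gaps : List (List (String × String))) (out : List (String × List (List (String × String)))) : Prop := out = fuzzy_group_gaps_py_alt all_gaps
instance (all_gaps : List (List (String × String))) (out : List (String × List (List (String × String)))) : Decidable (Spec_fuzzy_group_gaps_py all_gaps out) := by unfold Spec_fuzzy_group_gaps_py; infer_instance

-- ===== CLAIM (what is proved, stated in full; the proofs are below) =====
def Claim_equal_fuzzy_group_gaps_py : Prop := ∀ (all_gaps : List (List (String × String))), Dom_fuzzy_group_gaps_py all_gaps → Spec_fuzzy_group_gaps_py all_gaps (fuzzy_group_gaps_py all_gaps)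

-- ===== LEMMAS AND PROOFS =====

-- key of one gap dict
def pvKey (gap : List (String × String)) : String :=
  normalize_gap_description ((PySem.Dict.mk gap).getD "description" "")

-- the (key, gap) pairs with a nonempty key
def pvPE (all_gaps : List (List (String × String))) : List (String × List (String × String)) :=
  (all_gaps.map (fun gap => (pvKey gap, gap))).filter (fun p => !(p.1 == ""))

-- A's loop body is exactly a Dict.modify (with the empty-key skip)
theorem pvAstep_eq (groups : PySem.Dict String (List (List (String × String)))) (gap : List (String × String)) :
    (let key := normalize_gap_description ((PySem.Dict.mk gap).getD "description" "")
     if key = "" then groups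
     else
       let groups := if groups.contains key then groups else groups.insert key []
       groups.modify key [] (fun l => l ++ [gap]))
    = if pvKey gap = "" then groups else groups.modify (pvKey gap) [] (fun l => l ++ [gap]) := by
  show (if pvKey gap = "" then groups
        else ((if groups.contains (pvKey gap) then groups else groups.insert (pvKey gap) []).modify (pvKey gap) [] (fun l => l ++ [gap])))
      = _
  by_cases h : pvKey gap = ""
  · simp [h]
  · simp only [if_neg h]
    by_cases hc : groups.contains (pvKey gap)
    · simp [hc]
    · simp only [hc, if_false, Bool.false_eq_true]
      -- inserting [] at an absent key and then modifying there = modifying with default []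
      have hc' : groups.contains (pvKey gap) = false := by simpa using hc
      simp only [PySem.Dict.modify, PySem.Dict.getD_insert_self, PySem.Dict.insert_insert_self,
        PySem.Dict.getD_of_not_contains _ _ hc']

-- a fold over gaps skipping empty keys = a plain modify-fold over the nonempty pairs
theorem pvA_fold_eq (all_gaps : List (List (String × String))) (d : PySem.Dict String (List (List (String × String)))) :
    all_gaps.foldl (fun groups gap => if pvKey gap = "" then groups else groups.modify (pvKey gap) [] (fun l => l ++ [gap])) d
    = (pvPE all_gaps).foldl (fun groups p => groups.modify p.1 [] (fun l => l ++ [p.2])) d := by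
  induction all_gaps generalizing d with
  | nil => rfl
  | cons g gs ih =>
    by_cases h : pvKey g = ""
    · simp [pvPE, List.foldl_cons, h, ih]
    · simp [pvPE, List.foldl_cons, h, ih]

-- B's seen-loop = ordered dedup of the nonempty keys
theorem pvB_seen_eq (q : List (String × List (String × String))) (s : PySem.Set String) :
    q.foldl (fun seen p => if p.1 ≠ "" ∧ p.1 ∉ seen then seen ++ [p.1] else seen) s
    = PySem.Set.update s ((q.filter (fun p => !(p.1 == ""))).map (fun p => p.1)) := by
  induction q generalizing s with
  | nil => simp [PySem.Set.update]
  | cons p q ih =>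
    by_cases h : p.1 = ""
    · simp [h, ih]
    · simp only [List.foldl_cons, List.filter_cons]
      have : (if p.1 ≠ "" ∧ p.1 ∉ s then s ++ [p.1] else s) = PySem.Set.add s p.1 := by
        rw [PySem.Set.add_eq_ite]
        by_cases hm : p.1 ∈ s <;> simp [hm, h]
      simp only [this]
      rw [ih]
      simp [h, PySem.Set.update_cons]

theorem pv_main : ∀ (all_gaps : List (List (String × String))),
    fuzzy_group_gaps_py all_gaps = fuzzy_group_gaps_py_alt all_gaps := by
  intro all_gaps
  have hfun : (fun (groups : PySem.Dict String (List (List (String × String)))) gap =>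
      let key := normalize_gap_description ((PySem.Dict.mk gap).getD "description" "")
      if key = "" then groups
      else
        let groups := if groups.contains key then groups else groups.insert key []
        groups.modify key [] (fun l => l ++ [gap]))
      = (fun groups gap => if pvKey gap = "" then groups else groups.modify (pvKey gap) [] (fun l => l ++ [gap])) := by
    funext groups gap
    exact pvAstep_eq groups gap
  unfold fuzzy_group_gaps_py
  rw [hfun, pvA_fold_eq]
  -- A's dict items as a map over its (Nodup) key list
  have hnd : ((pvPE all_gaps).foldl (fun groups p => groups.modify p.1 [] (fun l => l ++ [p.2])) PySem.Dict.empty).keys.Nodup := by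
    exact PySem.Dict.nodup_keys_foldl_modify_key (pvPE all_gaps) (fun p => p.1) []
      (fun _ p => (fun l => l ++ [p.2])) PySem.Dict.empty (by simp)
  rw [PySem.Dict.items_eq_map_keys _ hnd []]
  have hkeys : ((pvPE all_gaps).foldl (fun groups p => groups.modify p.1 [] (fun l => l ++ [p.2])) PySem.Dict.empty).keys
      = PySem.Set.ofList ((pvPE all_gaps).map (fun p => p.1)) := by
    rw [PySem.Dict.keys_foldl_modify_key (pvPE all_gaps) (fun p => p.1) []
      (fun _ p => (fun l => l ++ [p.2])) PySem.Dict.empty]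
    simp [PySem.Set.update_nil_left]
  rw [hkeys]
  -- B's side
  show _ = fuzzy_group_gaps_py_alt all_gaps
  simp only [fuzzy_group_gaps_py_alt]
  rw [pvB_seen_eq, PySem.Set.update_nil_left]
  have hpe : ((all_gaps.map (fun gap => (normalize_gap_description ((PySem.Dict.mk gap).getD "description" ""), gap))).filter
      (fun p => !(p.1 == ""))) = pvPE all_gaps := rfl
  rw [hpe]
  -- both are maps over the same key list; compare values per key
  apply List.map_congr_left
  intro k hk
  have hk' : k ∈ (pvPE all_gaps).map (fun p => p.1) := (PySem.Set.mem_ofList _ _).mp hk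
  have hkne : k ≠ "" := by
    rcases List.mem_map.mp hk' with ⟨p, hp, rfl⟩
    have hpf : p ∈ pvPE all_gaps := hp
    unfold pvPE at hpf
    have := List.of_mem_filter hpf
    simpa using this
  rw [PySem.Dict.getD_foldl_modify_append (pvPE all_gaps) PySem.Dict.empty k]
  have hfilt : (pvPE all_gaps).filter (fun p => p.1 == k)
      = (all_gaps.map (fun gap => (pvKey gap, gap))).filter (fun p => p.1 == k) := by
    unfold pvPE
    rw [List.filter_filter]
    apply List.filter_congr
    intro p _
    by_cases hpk : p.1 = k
    · simp [hpk, hkne]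
    · simp [hpk]
  simp [hfilt, pvKey]

-- ===== VERDICT (by name: the statement is the Claim_ definition above) =====
theorem fuzzy_group_gaps_py_spec : Claim_equal_fuzzy_group_gaps_py := by
  intro all_gaps _
  exact pv_main all_gaps
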